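-- pv_equiv track=rewrite | github.com/andrewvgrassetti/VHH_biosimilar_library_generator | vhh_library/codon_optimizer.py | _flag_sites
-- ===== SOURCE A (Python) =====
-- _RESTRICTION_SITE_SEQS: dict[str, str] = {
--     "BamHI": "GGATCC",
--     "EcoRI": "GAATTC",
--     "HindIII": "AAGCTT",
--     "NdeI": "CATATG",
--     "BsaI": "GGTCTC",
--     "BpiI": "GAAGAC",
-- }
--
-- def _flag_sites(dna_sequence: str) -> list[str]:
--     """Flag internal stop codons and common restriction sites."""
--     flagged: list[str] = []
--
--     stop_codons = {"TAA", "TAG", "TGA"}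
--     for i in range(3, len(dna_sequence) - 2, 3):
--         codon = dna_sequence[i : i + 3]
--         if codon in stop_codons:
--             flagged.append(f"Internal stop codon {codon} at position {i}")
--
--     for name, site in _RESTRICTION_SITE_SEQS.items():
--         idx = dna_sequence.find(site)
--         while idx != -1:
--             flagged.append(f"{name} site ({site}) at position {idx}")
--             idx = dna_sequence.find(site, idx + 1)
--
--     return flagged
-- ===== SOURCE B (Python) =====
-- _RESTRICTION_SITE_SEQS: dict[str, str] = {
--     "BamHI": "GGATCC",
--     "EcoRI": "GAATTC",
--     "HindIII": "AAGCTT",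
--     "NdeI": "CATATG",
--     "BsaI": "GGTCTC",
--     "BpiI": "GAAGAC",
-- }
--
-- _SITE_TO_NAME = {site: name for name, site in _RESTRICTION_SITE_SEQS.items()}
--
-- def _flag_sites(dna_sequence: str) -> list[str]:
--     """Flag internal stop codons and common restriction sites (single window pass)."""
--     flagged: list[str] = [
--         f"Internal stop codon {dna_sequence[i : i + 3]} at position {i}"
--         for i in range(3, len(dna_sequence) - 2, 3)
--         if dna_sequence[i : i + 3] in ("TAA", "TAG", "TGA")
--     ]
--
--     hits: list[tuple[str, int]] = []
--     for i in range(len(dna_sequence) - 5):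
--         name = _SITE_TO_NAME.get(dna_sequence[i : i + 6])
--         if name is not None:
--             hits.append((name, i))
--
--     for name, site in _RESTRICTION_SITE_SEQS.items():
--         for n, p in hits:
--             if n == name:
--                 flagged.append(f"{name} site ({site}) at position {p}")
--
--     return flagged
-- ===== Notes on version B (the rewrite author's own statement) =====
-- stated objective: alternative
-- what changed: B replaces A's six separate str.find re-scan loops (one per restriction enzyme) by a single window pass over the sequence that looks each 6-mer up in an inverted site-to-enzyme dict, collecting hits once and then regrouping them per enzyme in dict order to emit the same messages in the same order.
import Mathlib
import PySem

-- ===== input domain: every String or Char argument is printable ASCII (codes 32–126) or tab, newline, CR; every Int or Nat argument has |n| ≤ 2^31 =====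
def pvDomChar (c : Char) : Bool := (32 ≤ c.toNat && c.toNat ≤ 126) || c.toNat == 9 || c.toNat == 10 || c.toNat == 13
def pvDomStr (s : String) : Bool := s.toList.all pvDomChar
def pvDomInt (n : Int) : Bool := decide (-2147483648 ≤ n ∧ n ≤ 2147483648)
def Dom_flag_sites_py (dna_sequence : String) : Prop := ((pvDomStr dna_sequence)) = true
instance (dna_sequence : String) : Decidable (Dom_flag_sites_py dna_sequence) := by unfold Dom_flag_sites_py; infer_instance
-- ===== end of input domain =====

-- B replaces A's six repeated str.find scans by ONE window pass over the sequence with an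
-- inverted site→enzyme dict, regrouping the hits per enzyme afterwards (objective: alternative).

-- ===== PORT A =====
-- _RESTRICTION_SITE_SEQS (module constant, used by both programs)
def pvSites : List (String × String) :=
  [("BamHI", "GGATCC"), ("EcoRI", "GAATTC"), ("HindIII", "AAGCTT"),
   ("NdeI", "CATATG"), ("BsaI", "GGTCTC"), ("BpiI", "GAAGAC")]

-- f"Internal stop codon {codon} at position {i}"
def pvMsgStop (codon : String) (i : Int) : String :=
  "Internal stop codon " ++ codon ++ " at position " ++ PySem.Int.toStr i

-- f"{name} site ({site}) at position {idx}"
def pvMsgSite (name site : String) (i : Int) : String :=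
  name ++ " site (" ++ site ++ ") at position " ++ PySem.Int.toStr i

-- A's inner 'while idx != -1' loop; the fuel (one more than the string length) only makes the
-- recursion structural, it is never exhausted
def pvFindLoop (dna name site : String) (idx : Int) : Nat → List String
  | 0 => []
  | fuel + 1 =>
    if idx = -1 then []
    else pvMsgSite name site idx ::
      pvFindLoop dna name site (PySem.Str.findFrom dna site (idx + 1)) fuel

def flag_sites_py (dna_sequence : String) : List String :=
  let flagged : List String :=
    (PySem.List.pyRange 3 (PySem.Str.len dna_sequence - 2) 3).foldl (fun acc i =>
      let codon := PySem.Str.slice dna_sequence (some i) (some (i + 3))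
      if (PySem.Set.ofList ["TAA", "TAG", "TGA"]).contains codon then
        acc ++ [pvMsgStop codon i]
      else acc) []
  pvSites.foldl (fun acc ns =>
    acc ++ pvFindLoop dna_sequence ns.1 ns.2 (PySem.Str.find dna_sequence ns.2)
      (dna_sequence.toList.length + 1)) flagged

-- ===== PORT B =====
-- _SITE_TO_NAME = {site: name for name, site in _RESTRICTION_SITE_SEQS.items()}
def pvInv : PySem.Dict String String :=
  pvSites.foldl (fun d p => d.insert p.2 p.1) PySem.Dict.empty

def flag_sites_py_alt (dna_sequence : String) : List String :=
  let flagged : List String :=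
    ((PySem.List.pyRange 3 (PySem.Str.len dna_sequence - 2) 3).filter (fun i =>
        (["TAA", "TAG", "TGA"] : List String).contains
          (PySem.Str.slice dna_sequence (some i) (some (i + 3))))).map (fun i =>
      pvMsgStop (PySem.Str.slice dna_sequence (some i) (some (i + 3))) i)
  let hits : List (String × Int) :=
    (PySem.List.pyRange 0 (PySem.Str.len dna_sequence - 5) 1).foldl (fun acc i =>
      match pvInv.get? (PySem.Str.slice dna_sequence (some i) (some (i + 6))) with
      | some name => acc ++ [(name, i)]
      | none => acc) []
  pvSites.foldl (fun acc ns =>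
    hits.foldl (fun acc2 h =>
      if h.1 == ns.1 then acc2 ++ [pvMsgSite ns.1 ns.2 h.2] else acc2) acc) flagged

-- ===== PRECONDITION & SPEC =====
def Spec_flag_sites_py (dna_sequence : String) (out : List String) : Prop := out = flag_sites_py_alt dna_sequence
instance (dna_sequence : String) (out : List String) : Decidable (Spec_flag_sites_py dna_sequence out) := by unfold Spec_flag_sites_py; infer_instance

-- ===== CLAIM (what is proved, stated in full; the proofs are below) =====
def Claim_equal_flag_sites_py : Prop := ∀ (dna_sequence : String), Dom_flag_sites_py dna_sequence → Spec_flag_sites_py dna_sequence (flag_sites_py dna_sequence)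

-- ===== LEMMAS AND PROOFS =====

-- the hit list B's single pass builds, named for the proofs (definitionally B's 'hits' let)
def pvHits (dna : String) : List (String × Int) :=
  (PySem.List.pyRange 0 (PySem.Str.len dna - 5) 1).foldl (fun acc i =>
    match pvInv.get? (PySem.Str.slice dna (some i) (some (i + 6))) with
    | some name => acc ++ [(name, i)]
    | none => acc) []

-- the positions ≥ k at which sub occurs in s, in increasing order
def pvOcc (s sub : List Char) (k : Nat) : List Nat :=
  (List.range' k (s.length - k)).filter (fun j => decide (sub <+: s.drop j))

theorem pv_str_ext {a b : String} (h : a.toList = b.toList) : a = b :=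
  String.toList_inj.mp h

theorem pv_foldl_hits (dna : String) (l : List Int) (acc : List (String × Int)) :
    l.foldl (fun acc i =>
      match pvInv.get? (PySem.Str.slice dna (some i) (some (i + 6))) with
      | some nm => acc ++ [(nm, i)] | none => acc) acc
    = acc ++ l.filterMap (fun i =>
        (pvInv.get? (PySem.Str.slice dna (some i) (some (i + 6)))).map (fun nm => (nm, i))) := by
  induction l generalizing acc with
  | nil => simp
  | cons x xs ih =>
    simp only [List.foldl_cons, List.filterMap_cons]
    cases h : pvInv.get? (PySem.Str.slice dna (some x) (some (x + 6))) with
    | none => simp [ih]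
    | some nm => simp [ih]

theorem pv_filterMap_ite {α β : Type} (p : α → Bool) (f : α → β) (l : List α) :
    l.filterMap (fun x => if p x then some (f x) else none) = (l.filter p).map f := by
  induction l with
  | nil => rfl
  | cons x xs ih => by_cases h : p x <;> simp [h, ih]

theorem pv_filter_range'_cons (n k pos : Nat) (P : Nat → Bool) (hk : k ≤ pos) (hpos : pos < n)
    (hP : P pos = true) (hmin : ∀ j, k ≤ j → j < pos → P j = false) :
    (List.range' k (n - k)).filter P = pos :: (List.range' (pos + 1) (n - (pos + 1))).filter P := by
  have hsplit : List.range' k (n - k) = List.range' k (pos - k) ++ List.range' pos (n - pos) := by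
    have h := List.range'_append (s := k) (m := pos - k) (n := n - pos) (step := 1)
    have h1 : k + 1 * (pos - k) = pos := by omega
    have h2 : (pos - k) + (n - pos) = n - k := by omega
    rw [h1, h2] at h
    exact h.symm
  have hcons : List.range' pos (n - pos) = pos :: List.range' (pos + 1) (n - (pos + 1)) := by
    have h3 : n - pos = (n - (pos + 1)) + 1 := by omega
    rw [h3, List.range'_succ]
  rw [hsplit, hcons, List.filter_append, List.filter_cons, if_pos hP]
  have hnil : (List.range' k (pos - k)).filter P = [] := by
    rw [List.filter_eq_nil_iff]
    intro a ha
    rw [List.mem_range'_1] at ha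
    simp [hmin a ha.1 (by omega)]
  rw [hnil, List.nil_append]

theorem pv_occ_nil (s sub : List Char) (k : Nat) (h : ¬ sub <:+: s.drop k) :
    pvOcc s sub k = [] := by
  unfold pvOcc
  rw [List.filter_eq_nil_iff]
  intro j hj
  rw [List.mem_range'_1] at hj
  simp only [decide_eq_true_eq]
  intro hpre
  apply h
  rw [← PySem.Chars.isIn_iff_infix, ← PySem.Chars.exists_prefix_drop_iff_isIn]
  refine ⟨j - k, ?_⟩
  rw [List.drop_drop, Nat.add_sub_cancel' hj.1]
  exact hpre

-- A's find loop from start index k produces exactly the occurrences ≥ k, in order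
theorem pv_findLoop_eq (dna name site : String) (hne : site.toList ≠ []) :
    ∀ fuel k, k ≤ dna.toList.length → dna.toList.length - k < fuel →
      pvFindLoop dna name site (PySem.Chars.findFrom dna.toList site.toList (k : Int)) fuel
        = (pvOcc dna.toList site.toList k).map (fun (j : Nat) => pvMsgSite name site ((j : Nat) : Int)) := by
  intro fuel
  induction fuel with
  | zero => intro k hk hf; omega
  | succ fuel ih =>
    intro k hk hf
    by_cases h : PySem.Chars.findFrom dna.toList site.toList (k : Int) = -1
    · rw [h, pv_occ_nil _ _ _
        ((PySem.Chars.findFrom_natCast_eq_neg_one_iff dna.toList site.toList k hk).mp h)]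
      simp [pvFindLoop]
    · obtain ⟨h1, h2, h3⟩ := PySem.Chars.findFrom_natCast_spec dna.toList site.toList k hk h
      set r := PySem.Chars.findFrom dna.toList site.toList (k : Int) with hr
      have hr0 : 0 ≤ r := le_trans (by exact_mod_cast Int.natCast_nonneg k) h1
      have hrpos : r = ((r.toNat : Nat) : Int) := (Int.toNat_of_nonneg hr0).symm
      have hsub : 0 < site.toList.length := List.length_pos_of_ne_nil hne
      have hlt : r.toNat < dna.toList.length := by
        have hl := h2.length_le
        rw [List.length_drop] at hl
        omega
      rw [pvFindLoop, if_neg h]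
      have hnext : PySem.Str.findFrom dna site (r + 1)
          = PySem.Chars.findFrom dna.toList site.toList ((r.toNat + 1 : Nat) : Int) := by
        rw [PySem.Str.findFrom_eq]
        congr 1
        omega
      rw [hnext, ih (r.toNat + 1) (by omega) (by omega)]
      have hocc : pvOcc dna.toList site.toList k
          = r.toNat :: pvOcc dna.toList site.toList (r.toNat + 1) := by
        unfold pvOcc
        exact pv_filter_range'_cons dna.toList.length k r.toNat _ (by omega) hlt
          (by simp [h2]) (fun j hj1 hj2 => by simp [h3 j hj1 hj2])
      rw [hocc]
      rw [List.map_cons]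
      rw [← hrpos]

-- which 6-mers B's inverted dict maps to which enzyme (lookups in last-insert-first if order)
theorem pv_get_inv (w : String) :
    pvInv.get? w =
      if w = "GAAGAC" then some "BpiI" else if w = "GGTCTC" then some "BsaI"
      else if w = "CATATG" then some "NdeI" else if w = "AAGCTT" then some "HindIII"
      else if w = "GAATTC" then some "EcoRI" else if w = "GGATCC" then some "BamHI"
      else none := by
  unfold pvInv pvSites
  simp only [List.foldl_cons, List.foldl_nil]
  rw [PySem.Dict.get?_insert, PySem.Dict.get?_insert, PySem.Dict.get?_insert,
    PySem.Dict.get?_insert, PySem.Dict.get?_insert, PySem.Dict.get?_insert,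
    PySem.Dict.get?_empty]

theorem pv_hinj (name site : String) (hmem : (name, site) ∈ pvSites) :
    ∀ w : String, pvInv.get? w = some name ↔ w = site := by
  fin_cases hmem <;>
    (intro w; rw [pv_get_inv]; split_ifs <;> first | (subst_vars; decide) | simp_all)

-- B's grouping step: the bucket of one enzyme, as the occurrence list
theorem pv_hits_filter (dna name site : String) (h6 : site.toList.length = 6)
    (hinj : ∀ w : String, pvInv.get? w = some name ↔ w = site) :
    ((pvHits dna).filter (fun h => h.1 == name)).map (fun h => pvMsgSite name site h.2)
      = (pvOcc dna.toList site.toList 0).map (fun (j : Nat) => pvMsgSite name site ((j : Nat) : Int)) := by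
  have hhits : pvHits dna
      = (PySem.List.pyRange 0 (PySem.Str.len dna - 5) 1).filterMap
          (fun i => (pvInv.get? (PySem.Str.slice dna (some i) (some (i + 6)))).map
            (fun nm => (nm, i))) := by
    unfold pvHits
    rw [pv_foldl_hits, List.nil_append]
  rw [hhits, List.filter_filterMap]
  have hpt : ∀ i ∈ PySem.List.pyRange 0 (PySem.Str.len dna - 5) 1,
      Option.filter (fun h => h.1 == name)
          ((pvInv.get? (PySem.Str.slice dna (some i) (some (i + 6)))).map (fun nm => (nm, i)))
        = if PySem.Str.slice dna (some i) (some (i + 6)) == site then some (name, i) else none := by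
    intro i _
    by_cases hw : PySem.Str.slice dna (some i) (some (i + 6)) = site
    · rw [hw, (hinj site).mpr rfl]
      simp [Option.filter]
    · have hbeq : (PySem.Str.slice dna (some i) (some (i + 6)) == site) = false := by
        simp [hw]
      rw [hbeq]
      cases hg : pvInv.get? (PySem.Str.slice dna (some i) (some (i + 6))) with
      | none => simp
      | some nm =>
        have hnm : nm ≠ name := fun hnm => hw ((hinj _).mp (by rw [hg, hnm]))
        simp [Option.filter, hnm]
  rw [List.filterMap_congr hpt, pv_filterMap_ite, List.map_map]
  -- turn the Int range into a Nat range
  rw [PySem.List.pyRange_one, PySem.Str.len_eq]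
  simp only [Int.sub_zero, zero_add]
  rw [List.filter_map, List.map_map]
  -- the window test IS the occurrence test
  have hwin : ∀ j : Nat, (PySem.Str.slice dna (some (j : Int)) (some ((j : Int) + 6)) == site)
      = decide (site.toList <+: dna.toList.drop j) := by
    intro j
    have h66 : ((j : Int) + 6) = ((j : Int) + ((6 : Nat) : Int)) := by norm_num
    have hsl : (PySem.Str.slice dna (some (j : Int)) (some ((j : Int) + 6))).toList
        = (dna.toList.drop j).take 6 := by
      rw [h66, PySem.Str.toList_slice, PySem.Chars.slice_eq_listSlice,
        PySem.List.slice_natCast_add]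
    have hiff : (PySem.Str.slice dna (some (j : Int)) (some ((j : Int) + 6)) = site)
        ↔ site.toList <+: dna.toList.drop j := by
      rw [List.prefix_iff_eq_take, h6]
      constructor
      · intro he
        rw [← he, hsl]
      · intro he
        apply pv_str_ext
        rw [hsl, ← he]
    rw [Bool.eq_iff_iff]
    simp only [beq_iff_eq, decide_eq_true_eq]
    exact hiff
  have hfc : ∀ j ∈ List.range ((dna.toList.length : Int) - 5).toNat,
      ((fun i : Int => PySem.Str.slice dna (some i) (some (i + 6)) == site) ∘ (fun k : Nat => (k : Int))) j
        = (fun j : Nat => decide (site.toList <+: dna.toList.drop j)) j := by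
    intro j _
    exact hwin j
  rw [List.filter_congr hfc]
  -- extend the scan range from len-5 to len: the extra windows are too short to match
  unfold pvOcc
  rw [Nat.sub_zero, ← List.range_eq_range']
  have hm : ((dna.toList.length : Int) - 5).toNat ≤ dna.toList.length := by omega
  have hsplit : List.range dna.toList.length
      = List.range ((dna.toList.length : Int) - 5).toNat
        ++ List.range' ((dna.toList.length : Int) - 5).toNat
            (dna.toList.length - ((dna.toList.length : Int) - 5).toNat) := by
    rw [List.range_eq_range', List.range_eq_range']
    have h := List.range'_append (s := 0) (m := ((dna.toList.length : Int) - 5).toNat)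
      (n := dna.toList.length - ((dna.toList.length : Int) - 5).toNat) (step := 1)
    simp only [Nat.zero_add, Nat.one_mul] at h
    rw [h]
    congr 1
    omega
  rw [hsplit, List.filter_append]
  have hnil : (List.range' ((dna.toList.length : Int) - 5).toNat
      (dna.toList.length - ((dna.toList.length : Int) - 5).toNat)).filter
        (fun j : Nat => decide (site.toList <+: dna.toList.drop j)) = [] := by
    rw [List.filter_eq_nil_iff]
    intro j hj
    rw [List.mem_range'_1] at hj
    simp only [decide_eq_true_eq]
    intro hpre
    have hl := hpre.length_le
    rw [List.length_drop, h6] at hl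
    omega
  rw [hnil, List.append_nil]
  simp [Function.comp]

-- A's stop-codon append loop produces exactly B's stop-codon comprehension
theorem pv_stops (dna : String) :
    ((PySem.List.pyRange 3 (PySem.Str.len dna - 2) 3).foldl (fun acc i =>
      let codon := PySem.Str.slice dna (some i) (some (i + 3))
      if (PySem.Set.ofList ["TAA", "TAG", "TGA"]).contains codon then
        acc ++ [pvMsgStop codon i]
      else acc) [])
    = ((PySem.List.pyRange 3 (PySem.Str.len dna - 2) 3).filter (fun i =>
        (["TAA", "TAG", "TGA"] : List String).contains
          (PySem.Str.slice dna (some i) (some (i + 3))))).map (fun i =>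
      pvMsgStop (PySem.Str.slice dna (some i) (some (i + 3))) i) := by
  have h := PySem.List.foldl_append_if
    (p := fun i : Int => (["TAA", "TAG", "TGA"] : List String).contains
      (PySem.Str.slice dna (some i) (some (i + 3))))
    (f := fun i : Int => pvMsgStop (PySem.Str.slice dna (some i) (some (i + 3))) i)
    (l := PySem.List.pyRange 3 (PySem.Str.len dna - 2) 3) (acc := [])
  rw [List.nil_append] at h
  exact h

theorem pv_folds (dna : String) (st : List String) :
    pvSites.foldl (fun acc ns =>
      acc ++ pvFindLoop dna ns.1 ns.2 (PySem.Str.find dna ns.2) (dna.toList.length + 1)) st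
    = pvSites.foldl (fun acc ns =>
      (pvHits dna).foldl (fun acc2 h =>
        if h.1 == ns.1 then acc2 ++ [pvMsgSite ns.1 ns.2 h.2] else acc2) acc) st := by
  have e : ∀ name site : String, (name, site) ∈ pvSites → site.toList.length = 6 →
      pvFindLoop dna name site (PySem.Str.find dna site) (dna.toList.length + 1)
        = ((pvHits dna).filter (fun h => h.1 == name)).map (fun h => pvMsgSite name site h.2) := by
    intro name site hmem h6
    rw [pv_hits_filter dna name site h6 (pv_hinj name site hmem)]
    have h0 : PySem.Str.find dna site
        = PySem.Chars.findFrom dna.toList site.toList ((0 : Nat) : Int) := by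
      rw [PySem.Str.find_eq, ← PySem.Chars.findFrom_zero]
      norm_num
    rw [h0, pv_findLoop_eq dna name site
      (by intro hnil; rw [hnil] at h6; simp at h6) _ 0 (by omega) (by omega)]
  simp only [pvSites, List.foldl_cons, List.foldl_nil, PySem.List.foldl_append_if]
  rw [e "BamHI" "GGATCC" (by decide) (by decide), e "EcoRI" "GAATTC" (by decide) (by decide),
    e "HindIII" "AAGCTT" (by decide) (by decide), e "NdeI" "CATATG" (by decide) (by decide),
    e "BsaI" "GGTCTC" (by decide) (by decide), e "BpiI" "GAAGAC" (by decide) (by decide)]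

theorem pv_main (dna : String) : flag_sites_py dna = flag_sites_py_alt dna := by
  unfold flag_sites_py flag_sites_py_alt
  rw [pv_stops dna]
  exact pv_folds dna _

-- ===== VERDICT (by name: the statement is the Claim_ definition above) =====
theorem flag_sites_py_spec : Claim_equal_flag_sites_py := by
  intro dna _
  unfold Spec_flag_sites_py
  exact pv_main dna
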